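-- pv_equiv track=rewrite | github.com/gitMatiH/Programacion1 | practica_parcial.py | minimo_edad_m
-- ===== SOURCE A (Python) =====
-- def minimo_edad_m(edades, generos):
--     ## no pide nombres, pero lo hacemos para practicar
--     i = 0
--     # vamos a recorrer la lista de géneros y vamos a buscar el primer masculino.
--     # como puede pasar que no haya ningún masculino, ponemos la condición "i<len(generos)"
--     while i<len(generos) and generos[i] != "M":
--         i=i+1
--
--     # vamos a enganchar el siguiente if con la condición de "i<len(generos)"
--     # la cual nos dice si hubo o no hubo participantes masculinos, y en base a eso procesa o no
--     if i<len(generos):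
--         #procesar
--         edad_min = edades[i]   # inicializamos con el que cortó el while, que es el primer masculino que queríamos
--         pos_min = i
--         for j in range(i,len(generos)): #recorremos el resto del array
--             if edades[j]<edad_min and generos[j] == 'M':
--                 edad_min = edades[j]
--     else:
--         edad_min = -1
--         return edad_min
--     return edad_min
-- ===== SOURCE B (Python) =====
-- def minimo_edad_m(edades, generos):
--     males = [edades[i] for i in range(len(generos)) if generos[i] == 'M']
--     return min(males) if males else -1
-- ===== Notes on version B (the rewrite author's own statement) =====
-- stated objective: simpler
-- what changed: Replaces A's two-phase scan (while-loop to find the first male, then an index for-loop maintaining a running minimum) by a single filter comprehension collecting male ages followed by min(), returning -1 for the empty case; Pre_ excludes exactly the inputs where A raises IndexError (a male present while edades is shorter than generos).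
import Mathlib
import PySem

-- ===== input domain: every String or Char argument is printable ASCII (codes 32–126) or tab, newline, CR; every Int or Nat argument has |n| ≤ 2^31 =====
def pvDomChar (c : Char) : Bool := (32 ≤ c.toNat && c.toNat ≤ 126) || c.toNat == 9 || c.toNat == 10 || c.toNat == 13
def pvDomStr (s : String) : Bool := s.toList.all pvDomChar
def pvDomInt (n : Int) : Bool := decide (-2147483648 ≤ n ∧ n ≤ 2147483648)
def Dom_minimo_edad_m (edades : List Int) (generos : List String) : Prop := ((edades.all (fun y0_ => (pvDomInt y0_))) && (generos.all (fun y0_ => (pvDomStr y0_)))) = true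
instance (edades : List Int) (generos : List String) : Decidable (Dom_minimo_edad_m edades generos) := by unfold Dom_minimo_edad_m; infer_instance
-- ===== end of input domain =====

-- B replaces A's two-phase scan (find first 'M', then running minimum) by filter-then-min; objective: simpler.

-- ===== PORT A =====
-- the while-loop of A: first index ≥ i whose gender is "M", or len(generos)
def pvFirstM (generos : List String) (i : Nat) : Nat :=
  if h : i < generos.length then
    if generos[i] = "M" then i else pvFirstM generos (i + 1)
  else i
termination_by generos.length - i

def minimo_edad_m (edades : List Int) (generos : List String) : Int :=
  let i := pvFirstM generos 0
  if i < generos.length then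
    let edad_min := PySem.List.pyGetD edades (i : Int) 0  -- edades[i]; in range under Pre_
    let _pos_min := i
    (PySem.List.pyRange (i : Int) (generos.length : Int) 1).foldl
      (fun edad_min j =>
        if PySem.List.pyGetD edades j 0 < edad_min ∧ PySem.List.pyGetD generos j "" = "M"
        then PySem.List.pyGetD edades j 0 else edad_min) edad_min
  else
    -1

-- ===== PORT B =====
def minimo_edad_m_alt (edades : List Int) (generos : List String) : Int :=
  let males := (List.range generos.length).filterMap (fun (i : Nat) =>
    if (PySem.List.pyGet? generos (i : Int)).getD "" = "M"
    then PySem.List.pyGet? edades (i : Int) else none)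
  match males.min? with
  | some m => m
  | none => -1

-- ===== PRECONDITION & SPEC =====
-- Pre_ excludes exactly the inputs on which A raises IndexError: a male entry present while
-- edades is shorter than generos (A indexes edades at every position from the first male on).
def Pre_minimo_edad_m (edades : List Int) (generos : List String) : Prop :=
  "M" ∈ generos → generos.length ≤ edades.length
instance (edades : List Int) (generos : List String) : Decidable (Pre_minimo_edad_m edades generos) := by unfold Pre_minimo_edad_m; infer_instance

def pvWitness_minimo_edad_m : List Int × List String := ([5, 3, 7], ["F", "M", "M"])

def Spec_minimo_edad_m (edades : List Int) (generos : List String) (out : Int) : Prop := out = minimo_edad_m_alt edades generos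
instance (edades : List Int) (generos : List String) (out : Int) : Decidable (Spec_minimo_edad_m edades generos out) := by unfold Spec_minimo_edad_m; infer_instance

-- ===== CLAIM (what is proved, stated in full; the proofs are below) =====
def Claim_equal_minimo_edad_m : Prop := ∀ (edades : List Int) (generos : List String), Dom_minimo_edad_m edades generos → Pre_minimo_edad_m edades generos → Spec_minimo_edad_m edades generos (minimo_edad_m edades generos)

-- ===== LEMMAS AND PROOFS =====

-- male ages at indices [a, a+len)
def malesSeg (edades : List Int) (generos : List String) (a len : Nat) : List Int :=
  (List.range' a len).filterMap (fun i =>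
    if (generos[i]?).getD "" = "M" then edades[i]? else none)

lemma malesSeg_zero (e : List Int) (g : List String) (a : Nat) : malesSeg e g a 0 = [] := rfl

lemma malesSeg_succ (e : List Int) (g : List String) (a k : Nat) :
    malesSeg e g a (k + 1) =
      (if (g[a]?).getD "" = "M" then (e[a]?).toList else []) ++ malesSeg e g (a + 1) k := by
  simp only [malesSeg, List.range'_succ, List.filterMap_cons]
  by_cases hM : (g[a]?).getD "" = "M"
  · rw [if_pos hM, if_pos hM]; cases e[a]? <;> simp
  · rw [if_neg hM, if_neg hM]; simp

lemma pvFirstM_not_M (g : List String) (i : Nat) :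
    ∀ j : Nat, i ≤ j → j < pvFirstM g i → g[j]? ≠ some "M" := by
  fun_induction pvFirstM with
  | case1 i h hM => intro j h1 h2; omega
  | case2 i h hne ih =>
      intro j h1 h2
      rcases Nat.eq_or_lt_of_le h1 with rfl | hlt
      · simp [List.getElem?_eq_getElem h, hne]
      · exact ih j hlt h2
  | case3 i h =>
      intro j h1 h2; omega

lemma pvFirstM_is_M (g : List String) (i : Nat) (h : pvFirstM g i < g.length) :
    g[pvFirstM g i]? = some "M" := by
  fun_induction pvFirstM with
  | case1 i hlt hM => simp [List.getElem?_eq_getElem hlt, hM]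
  | case2 i hlt hne ih => exact ih h
  | case3 i hge => omega

lemma pvFirstM_mem (g : List String) (h : pvFirstM g 0 < g.length) : "M" ∈ g := by
  have := pvFirstM_is_M g 0 h
  exact List.mem_of_getElem? this

-- the running-minimum fold of A over indices [a, a+k) equals a fold over the male-age segment
lemma fold_seg (e : List Int) (g : List String) (hm : g.length ≤ e.length) :
    ∀ (k a : Nat) (em : Int), a + k ≤ g.length →
      (PySem.List.pyRange (a : Int) ((a + k : Nat) : Int) 1).foldl
        (fun edad_min j =>
          if PySem.List.pyGetD e j 0 < edad_min ∧ PySem.List.pyGetD g j "" = "M"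
          then PySem.List.pyGetD e j 0 else edad_min) em
      = (malesSeg e g a k).foldl (fun em x => if x < em then x else em) em := by
  intro k
  induction k with
  | zero =>
      intro a em _
      rw [PySem.List.pyRange_one_eq_nil (by omega)]
      simp [malesSeg_zero]
  | succ k ih =>
      intro a em hle
      have ha : a < g.length := by omega
      have hae : a < e.length := by omega
      have hcons : PySem.List.pyRange (a : Int) ((a + (k+1) : Nat) : Int) 1
          = (a : Int) :: PySem.List.pyRange ((a : Int) + 1) ((a + (k+1) : Nat) : Int) 1 :=
        PySem.List.pyRange_one_cons (by push_cast; omega)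
      have hcast : ((a : Int) + 1) = (((a + 1 : Nat)) : Int) := by push_cast; ring
      have hcast2 : ((a + (k+1) : Nat) : Int) = (((a + 1) + k : Nat) : Int) := by push_cast; ring
      rw [hcons, List.foldl_cons, hcast, hcast2, ih (a+1) _ (by omega), malesSeg_succ]
      have hg : PySem.List.pyGetD g (a : Int) "" = g[a] := by
        simp [PySem.List.pyGetD_natCast, List.getD, List.getElem?_eq_getElem ha]
      have he : PySem.List.pyGetD e (a : Int) 0 = e[a] := by
        simp [PySem.List.pyGetD_natCast, List.getD, List.getElem?_eq_getElem hae]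
      by_cases hM : g[a] = "M"
      · simp [hg, he, hM, List.getElem?_eq_getElem hae, List.getElem?_eq_getElem ha]
      · simp [hg, he, hM, List.getElem?_eq_getElem ha]

lemma malesSeg_nil_of_no_M (e : List Int) (g : List String) (a k : Nat)
    (h : ∀ j : Nat, a ≤ j → j < a + k → g[j]? ≠ some "M") :
    malesSeg e g a k = [] := by
  induction k generalizing a with
  | zero => rfl
  | succ k ih =>
      rw [malesSeg_succ]
      have h1 : (g[a]?).getD "" ≠ "M" := by
        cases hga : g[a]? with
        | none => simp
        | some s =>
            intro hc
            rw [Option.getD_some] at hc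
            exact h a le_rfl (by omega) (by rw [hga, hc])
      rw [if_neg h1, List.nil_append]
      exact ih (a + 1) (fun j hj1 hj2 => h j (by omega) (by omega))

-- B's males list is malesSeg over the whole index range
lemma alt_eq_malesSeg (e : List Int) (g : List String) :
    minimo_edad_m_alt e g =
      match (malesSeg e g 0 g.length).min? with
      | some m => m
      | none => -1 := by
  simp only [minimo_edad_m_alt, malesSeg, PySem.List.pyGet?_natCast, List.range_eq_range']

theorem minimo_edad_m_spec : Claim_equal_minimo_edad_m := by
  intro e g _ hpre
  unfold Spec_minimo_edad_m
  rw [alt_eq_malesSeg]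
  unfold minimo_edad_m
  set i0 := pvFirstM g 0 with hi0
  by_cases h : i0 < g.length
  · -- there is a male
    have hmem : "M" ∈ g := pvFirstM_mem g h
    have hm : g.length ≤ e.length := hpre hmem
    have hie : i0 < e.length := by omega
    rw [if_pos h]
    -- split the full segment at i0; the prefix is empty
    have hsplit : malesSeg e g 0 g.length = malesSeg e g 0 i0 ++ malesSeg e g i0 (g.length - i0) := by
      unfold malesSeg
      rw [← List.filterMap_append]
      congr 1
      have h2 := @List.range'_append 0 i0 (g.length - i0) 1
      simp only [Nat.zero_add, Nat.one_mul] at h2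
      rw [h2]
      congr 1
      omega
    have hpre0 : malesSeg e g 0 i0 = [] :=
      malesSeg_nil_of_no_M e g 0 i0 (fun j _ hj => pvFirstM_not_M g 0 j (Nat.zero_le j) (by omega))
    -- the segment from i0 starts with edades[i0]
    have hM0 : g[i0]? = some "M" := pvFirstM_is_M g 0 h
    obtain ⟨k, hk⟩ : ∃ k, g.length - i0 = k + 1 := ⟨g.length - i0 - 1, by omega⟩
    have hhead : malesSeg e g i0 (g.length - i0) = e[i0] :: malesSeg e g (i0 + 1) k := by
      rw [hk, malesSeg_succ]
      simp [hM0, List.getElem?_eq_getElem hie]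
    have hge : PySem.List.pyGetD e (i0 : Int) 0 = e[i0] := by
      simp [PySem.List.pyGetD_natCast, List.getD, List.getElem?_eq_getElem hie]
    have hrange : ((g.length : Nat) : Int) = ((i0 + (g.length - i0) : Nat) : Int) := by
      push_cast; omega
    rw [hrange, hge, fold_seg e g hm (g.length - i0) i0 _ (by omega), hsplit, hpre0,
      List.nil_append, hhead, List.min?_cons']
    have hminf : (fun (em x : Int) => if x < em then x else em) = min := by
      funext a b
      rw [min_def]
      split_ifs <;> omega
    rw [List.foldl_cons, if_neg (by simp), hminf]
  · rw [if_neg h]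
    have : malesSeg e g 0 g.length = [] :=
      malesSeg_nil_of_no_M e g 0 g.length
        (fun j _ hj => pvFirstM_not_M g 0 j (Nat.zero_le j) (by omega))
    rw [this]
    rfl
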